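-- pv_equiv track=rewrite | github.com/TophLumina/FIT9136 | Assignment3/task7/task7.py | match_sequence
-- ===== SOURCE A (Python) =====
-- def match_sequence(game: dict, seq: list[str]) -> bool:
--     """
--     Check if the game matches the given sequence of moves.
--     """
--     for i, move in enumerate(seq):
--         round_num = (i // 2) + 1
--         is_white_move = i % 2 == 0
--
--         if round_num > 20:
--             return False
--
--         if is_white_move:
--             game_move = game.get(f"w{round_num}", "-")
--         else:
--             game_move = game.get(f"b{round_num}", "-")
--
--         if game_move != move:
--             return False
--
--     return True
-- ===== SOURCE B (Python) =====
-- def match_sequence(game: dict, seq: list[str]) -> bool: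
--     """
--     Check if the game matches the given sequence of moves.
--     """
--     if len(seq) > 40:
--         return False
--     expected = []
--     for r in range(1, 21):
--         expected.append(game.get(f"w{r}", "-"))
--         expected.append(game.get(f"b{r}", "-"))
--     return seq == expected[:len(seq)]
-- ===== Notes on version B (the rewrite author's own statement) =====
-- stated objective: alternative
-- what changed: B guards len(seq) > 40, then builds the full 40-entry expected move table by looping over rounds 1..20 (two appends per round) and compares seq against the table's prefix in one bulk comparison, instead of A's per-element scan of seq with index arithmetic and per-index dict lookups.
import Mathlib
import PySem

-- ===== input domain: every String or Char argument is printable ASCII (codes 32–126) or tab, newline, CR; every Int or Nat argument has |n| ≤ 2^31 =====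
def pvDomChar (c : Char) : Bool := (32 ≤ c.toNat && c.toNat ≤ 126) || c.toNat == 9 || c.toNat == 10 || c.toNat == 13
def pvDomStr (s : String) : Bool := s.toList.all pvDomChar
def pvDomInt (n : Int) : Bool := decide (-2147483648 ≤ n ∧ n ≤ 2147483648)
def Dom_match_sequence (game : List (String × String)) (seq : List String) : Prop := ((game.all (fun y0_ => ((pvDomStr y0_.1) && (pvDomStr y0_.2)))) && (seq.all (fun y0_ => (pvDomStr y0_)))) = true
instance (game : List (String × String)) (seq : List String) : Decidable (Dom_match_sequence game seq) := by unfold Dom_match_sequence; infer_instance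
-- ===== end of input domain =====

-- B builds the full 40-entry expected-move table over rounds 1..20 and compares seq with its
-- prefix in one bulk comparison, instead of A's per-element scan of seq (alternative decomposition).

-- ===== PORT A =====
-- the `for i, move in enumerate(seq)` loop: structural recursion on seq carrying the index i
def matchLoop (game : List (String × String)) : List String → Nat → Bool
  | [], _ => true
  | move :: rest, i =>
    let round_num : Nat := i / 2 + 1
    let is_white_move : Bool := i % 2 == 0
    if round_num > 20 then false
    else
      let game_move : String :=
        if is_white_move then PySem.Dict.getD (PySem.Dict.mk game) ("w" ++ PySem.Int.toStr (round_num : Int)) "-"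
        else PySem.Dict.getD (PySem.Dict.mk game) ("b" ++ PySem.Int.toStr (round_num : Int)) "-"
      if game_move ≠ move then false
      else matchLoop game rest (i + 1)

def match_sequence (game : List (String × String)) (seq : List String) : Bool :=
  matchLoop game seq 0

-- ===== PORT B =====
def match_sequence_alt (game : List (String × String)) (seq : List String) : Bool :=
  if seq.length > 40 then false
  else
    let expected : List String :=
      (PySem.List.pyRange 1 21 1).foldl
        (fun acc r =>
          acc ++ [PySem.Dict.getD (PySem.Dict.mk game) ("w" ++ PySem.Int.toStr r) "-",
                  PySem.Dict.getD (PySem.Dict.mk game) ("b" ++ PySem.Int.toStr r) "-"]) []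
    decide (seq = expected.take seq.length)

-- ===== PRECONDITION & SPEC =====
def Spec_match_sequence (game : List (String × String)) (seq : List String) (out : Bool) : Prop := out = match_sequence_alt game seq
instance (game : List (String × String)) (seq : List String) (out : Bool) : Decidable (Spec_match_sequence game seq out) := by unfold Spec_match_sequence; infer_instance

-- ===== CLAIM (what is proved, stated in full; the proofs are below) =====
def Claim_equal_match_sequence : Prop := ∀ (game : List (String × String)) (seq : List String), Dom_match_sequence game seq → Spec_match_sequence game seq (match_sequence game seq)

-- ===== LEMMAS AND PROOFS =====

-- the expected move at (0-based) index k, exactly as A computes it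
def expMove (game : List (String × String)) (k : Nat) : String :=
  if k % 2 == 0 then PySem.Dict.getD (PySem.Dict.mk game) ("w" ++ PySem.Int.toStr ((k / 2 + 1 : Nat) : Int)) "-"
  else PySem.Dict.getD (PySem.Dict.mk game) ("b" ++ PySem.Int.toStr ((k / 2 + 1 : Nat) : Int)) "-"

def expTable (game : List (String × String)) : List String :=
  (List.range 40).map (expMove game)

lemma expTable_length (game : List (String × String)) : (expTable game).length = 40 := by
  simp [expTable]

lemma expMove_even (game : List (String × String)) (n : Nat) :
    expMove game (2 * n) = PySem.Dict.getD (PySem.Dict.mk game) ("w" ++ PySem.Int.toStr ((n : Int) + 1)) "-" := by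
  have h1 : (2 * n) % 2 = 0 := by omega
  have h2 : 2 * n / 2 = n := by omega
  simp [expMove, h1, h2]

lemma expMove_odd (game : List (String × String)) (n : Nat) :
    expMove game (2 * n + 1) = PySem.Dict.getD (PySem.Dict.mk game) ("b" ++ PySem.Int.toStr ((n : Int) + 1)) "-" := by
  have h1 : (2 * n + 1) % 2 = 1 := by omega
  have h2 : (2 * n + 1) / 2 = n := by omega
  simp [expMove, h1, h2]

lemma fold_expected (game : List (String × String)) (n : Nat) (acc : List String) :
    (List.range n).foldl
      (fun (acc : List String) (m : Nat) =>
        acc ++ [PySem.Dict.getD (PySem.Dict.mk game) ("w" ++ PySem.Int.toStr ((m : Int) + 1)) "-",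
                PySem.Dict.getD (PySem.Dict.mk game) ("b" ++ PySem.Int.toStr ((m : Int) + 1)) "-"]) acc
    = acc ++ (List.range (2 * n)).map (expMove game) := by
  induction n generalizing acc with
  | zero => simp
  | succ n ih =>
    rw [List.range_succ, List.foldl_append, ih]
    have h2 : 2 * (n + 1) = (2 * n + 1) + 1 := by omega
    rw [h2, List.range_succ, List.range_succ]
    simp [expMove_even, expMove_odd, List.append_assoc]

lemma pyRange_1_21 : PySem.List.pyRange 1 21 1 = (List.range 20).map (fun (m : Nat) => (m : Int) + 1) := by
  decide

lemma expected_eq_table (game : List (String × String)) :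
    (PySem.List.pyRange 1 21 1).foldl
      (fun acc r =>
        acc ++ [PySem.Dict.getD (PySem.Dict.mk game) ("w" ++ PySem.Int.toStr r) "-",
                PySem.Dict.getD (PySem.Dict.mk game) ("b" ++ PySem.Int.toStr r) "-"]) []
    = expTable game := by
  rw [pyRange_1_21, List.foldl_map, fold_expected]
  simp [expTable]

lemma matchLoop_eq (game : List (String × String)) (seq : List String) (i : Nat) :
    matchLoop game seq i
      = (decide (seq = []) ||
          (decide (seq.length + i ≤ 40) &&
            decide (seq = ((expTable game).drop i).take seq.length))) := by
  induction seq generalizing i with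
  | nil => simp [matchLoop]
  | cons move rest ih =>
    by_cases hi : i < 40
    · have hround : ¬ (i / 2 + 1 > 20) := by omega
      have hi' : i < (expTable game).length := by rw [expTable_length]; exact hi
      have hdrop : (expTable game).drop i
          = (expTable game)[i]'hi' :: (expTable game).drop (i + 1) :=
        List.drop_eq_getElem_cons hi'
      have hget : (expTable game)[i]'hi' = expMove game i := by
        simp [expTable]
      rw [matchLoop]
      simp only [hround, if_false]
      have hgm : (if (i % 2 == 0 : Bool)
            then PySem.Dict.getD (PySem.Dict.mk game) ("w" ++ PySem.Int.toStr ((i / 2 + 1 : Nat) : Int)) "-"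
            else PySem.Dict.getD (PySem.Dict.mk game) ("b" ++ PySem.Int.toStr ((i / 2 + 1 : Nat) : Int)) "-")
          = expMove game i := by
        simp [expMove]
      rw [hgm]
      by_cases hm : expMove game i = move
      · simp only [hm, ne_eq, not_true_eq_false, if_false, ih]
        rw [hdrop, hget, hm]
        rcases eq_or_ne rest ([] : List String) with hr | hr
        · subst hr
          simp
          omega
        · simp only [hr, decide_false, Bool.false_or, List.length_cons, List.take_succ_cons,
            List.cons_eq_cons, true_and, reduceCtorEq]
          have hlen : rest.length + 1 + i ≤ 40 ↔ rest.length + (i + 1) ≤ 40 := by omega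
          simp [hlen]
      · have hz : (if expMove game i ≠ move then false else matchLoop game rest (i + 1)) = false := by
          simp [hm]
        rw [hz, hdrop, hget]
        have hm' : move ≠ expMove game i := fun h => hm h.symm
        simp [hm']
    · have hround : i / 2 + 1 > 20 := by omega
      rw [matchLoop]
      simp only [hround, if_true]
      have h40 : ¬ (rest.length + 1 + i ≤ 40) := by omega
      simp [h40]

-- ===== VERDICT (by name: the statement is the Claim_ definition above) =====
theorem match_sequence_spec : Claim_equal_match_sequence := by
  intro game seq _
  unfold Spec_match_sequence match_sequence match_sequence_alt
  rw [matchLoop_eq, expected_eq_table]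
  by_cases hlen : seq.length > 40
  · have hne : seq ≠ ([] : List String) := by intro h; subst h; simp at hlen
    simp [hlen, hne]
  · by_cases hnil : seq = ([] : List String)
    · subst hnil; simp
    · have h40 : seq.length ≤ 40 := by omega
      simp [hlen, hnil, h40]
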